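-- pv_equiv track=rewrite | github.com/judemazo2015/python-exercises | day19_is_all_rotated_versions.py | get_rotations
-- ===== SOURCE A (Python) =====
-- def get_rotations(matrix):
--     first, size = matrix[0], len(matrix[0])
--     rotations = []
--     for _ in range(size):
--         temp = first[0]
--         for i in range(size):
--             first[i] = first[i+1] if i < size-1 else ""
--         first[-1] = temp
--         rotations.append("".join(first))
--     return rotations
-- ===== SOURCE B (Python) =====
-- def get_rotations(matrix):
--     first = matrix[0]
--     size = len(first)
--     return ["".join(first[i+1:] + first[:i+1]) for i in range(size)]
-- ===== Notes on version B (the rewrite author's own statement) =====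
-- stated objective: simpler
-- what changed: B builds each rotation independently by slicing the unchanged first row (first[i+1:]+first[:i+1]) in one comprehension, instead of A's stateful in-place element-by-element shift carried across outer iterations.
import Mathlib
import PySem

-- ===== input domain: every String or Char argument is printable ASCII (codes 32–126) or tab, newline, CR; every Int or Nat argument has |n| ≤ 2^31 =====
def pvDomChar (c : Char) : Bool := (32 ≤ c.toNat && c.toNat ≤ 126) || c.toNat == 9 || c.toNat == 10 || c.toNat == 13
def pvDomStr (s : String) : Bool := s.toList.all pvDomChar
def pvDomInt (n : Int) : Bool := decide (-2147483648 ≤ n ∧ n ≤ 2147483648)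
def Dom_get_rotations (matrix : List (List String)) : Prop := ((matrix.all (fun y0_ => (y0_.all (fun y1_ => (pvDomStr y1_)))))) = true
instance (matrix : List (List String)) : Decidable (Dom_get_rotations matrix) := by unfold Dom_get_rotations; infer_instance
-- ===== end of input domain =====

-- B recomputes each rotation by slicing the unchanged first row instead of A's in-place
-- stateful shifting (simpler). A mutates matrix[0] during execution but its net mutation
-- is zero; the equivalence proved is about the return value.

-- ===== PORT A =====
-- inner loop body: first[i] = first[i+1] if i < size-1 else ""
def pvInnerStep (size : Nat) (acc : List String) (i : Int) : List String :=
  PySem.List.pySetD acc i (if i < (size : Int) - 1 then PySem.List.pyGetD acc (i + 1) "" else "")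

-- one outer-loop iteration on `first`: temp = first[0]; the inner for-loop; first[-1] = temp
def pvShift (size : Nat) (first : List String) : List String :=
  let temp := PySem.List.pyGetD first 0 ""
  let first := (PySem.List.pyRange 0 (size : Int) 1).foldl (pvInnerStep size) first
  PySem.List.pySetD first (-1) temp

def get_rotations (matrix : List (List String)) : List String :=
  let first := PySem.List.pyGetD matrix 0 []      -- matrix[0]; in range by Pre_
  let size := first.length
  let st := (PySem.List.pyRange 0 (size : Int) 1).foldl
    (fun (st : List String × List String) _ =>
      let first := pvShift size st.1
      (first, st.2 ++ [PySem.Str.join "" first]))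
    (first, [])
  st.2

-- ===== PORT B =====
def get_rotations_alt (matrix : List (List String)) : List String :=
  let first := PySem.List.pyGetD matrix 0 []      -- matrix[0]; in range by Pre_
  let size := first.length
  (PySem.List.pyRange 0 (size : Int) 1).map (fun i =>
    PySem.Str.join "" (PySem.List.slice first (some (i + 1)) none ++
                       PySem.List.slice first none (some (i + 1))))

-- ===== PRECONDITION & SPEC =====
-- matrix[0] raises IndexError on an empty matrix (in both A and B)
def Pre_get_rotations (matrix : List (List String)) : Prop := matrix ≠ []
instance (matrix : List (List String)) : Decidable (Pre_get_rotations matrix) := by unfold Pre_get_rotations; infer_instance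
def pvWitness_get_rotations : List (List String) := [["a", "b", "c"], ["x"]]

def Spec_get_rotations (matrix : List (List String)) (out : List String) : Prop := out = get_rotations_alt matrix
instance (matrix : List (List String)) (out : List String) : Decidable (Spec_get_rotations matrix out) := by unfold Spec_get_rotations; infer_instance

-- ===== CLAIM (what is proved, stated in full; the proofs are below) =====
def Claim_equal_get_rotations : Prop := ∀ (matrix : List (List String)), Dom_get_rotations matrix → Pre_get_rotations matrix → Spec_get_rotations matrix (get_rotations matrix)

-- ===== LEMMAS AND PROOFS =====

theorem pv_step_mid (l : List String) (n j : Nat) (h : l.length = n) (hj : j + 1 < n) :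
    pvInnerStep n ((l.drop 1).take j ++ l.drop j) ((0 : Int) + j)
      = (l.drop 1).take (j + 1) ++ l.drop (j + 1) := by
  have hlen : ((l.drop 1).take j).length = j := by
    simp; omega
  have hcond : ((0 : Int) + j) < (n : Int) - 1 := by push_cast; omega
  have hjl : j < l.length := by omega
  have hj1 : j + 1 < l.length := by omega
  unfold pvInnerStep
  rw [if_pos hcond]
  have e1 : ((0 : Int) + (j : Int)) = ((j : Nat) : Int) := by push_cast; ring
  have e2 : ((j : Int) + 1) = (((j + 1 : Nat)) : Int) := by push_cast; ring
  rw [e1, e2, PySem.List.pySetD_natCast, PySem.List.pyGetD_natCast]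
  have hget : ((l.drop 1).take j ++ l.drop j).getD (j + 1) "" = l[j + 1] := by
    rw [List.getD, List.getElem?_append_right (by omega), hlen]
    simp [List.getElem?_drop]
    rw [List.getElem?_eq_getElem hj1]
    rfl
  rw [hget, List.set_append, hlen, if_neg (by omega)]
  have hd : l.drop j = l[j] :: l.drop (j + 1) := List.drop_eq_getElem_cons hjl
  rw [hd]
  simp only [Nat.sub_self, List.set_cons_zero]
  have ht : (l.drop 1).take (j + 1) = (l.drop 1).take j ++ [l[j + 1]] := by
    rw [List.take_add_one]
    congr 1
    rw [List.getElem?_drop, List.getElem?_eq_getElem (by omega)]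
    simp [Nat.add_comm]
  rw [ht, List.append_assoc]
  rfl

theorem pv_step_last (l : List String) (n : Nat) (h : l.length = n) (hn : 0 < n) :
    pvInnerStep n ((l.drop 1).take (n - 1) ++ l.drop (n - 1)) ((0 : Int) + (n - 1 : Nat))
      = l.drop 1 ++ [""] := by
  have hlen : ((l.drop 1).take (n - 1)).length = n - 1 := by simp; omega
  have hcond : ¬ ((0 : Int) + ((n - 1 : Nat) : Int)) < (n : Int) - 1 := by push_cast; omega
  unfold pvInnerStep
  rw [if_neg hcond]
  have e1 : ((0 : Int) + ((n - 1 : Nat) : Int)) = (((n - 1 : Nat)) : Int) := by push_cast; ring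
  rw [e1, PySem.List.pySetD_natCast]
  simp only [List.set_append, hlen]
  rw [if_neg (by omega)]
  have hd := List.drop_eq_getElem_cons (l := l) (i := n - 1) (by omega)
  rw [Nat.sub_add_cancel (by omega : 1 ≤ n)] at hd
  rw [hd]
  simp only [Nat.sub_self, List.set_cons_zero]
  have : l.drop n = [] := by rw [List.drop_eq_nil_iff]; omega
  rw [this]
  have : (l.drop 1).take (n - 1) = l.drop 1 := by
    rw [List.take_of_length_le]; simp; omega
  rw [this]

theorem pv_setD_neg_one (xs : List String) (v : String) (h : xs ≠ []) :
    PySem.List.pySetD xs (-1) v = xs.set (xs.length - 1) v := by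
  have hl : 0 < xs.length := List.length_pos_iff.mpr h
  simp [PySem.List.pySetD, PySem.List.pySet?, PySem.List.pyIdx?]
  rw [if_pos (by omega)]
  rfl

theorem inner_aux (l : List String) (n : Nat) (h : l.length = n)
    (m j : Nat) (hm : j + m = n) (hj : m ≥ 1) :
    (List.range' j m).foldl (fun acc (k : Nat) => pvInnerStep n acc ((0 : Int) + k))
      ((l.drop 1).take j ++ l.drop j) = l.drop 1 ++ [""] := by
  induction m generalizing j with
  | zero => omega
  | succ m ih =>
    rw [List.range'_succ, List.foldl_cons]
    rcases Nat.eq_zero_or_pos m with hm0 | hm1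
    · subst hm0
      have hj' : j = n - 1 := by omega
      subst hj'
      rw [pv_step_last l n h (by omega)]
      simp
    · rw [pv_step_mid l n j h (by omega)]
      exact ih (j + 1) (by omega) hm1


theorem pvshift_rotate (l : List String) (h : 0 < l.length) :
    pvShift l.length l = l.rotate 1 := by
  unfold pvShift
  rw [PySem.List.pyRange_one, List.foldl_map]
  have hn : ((l.length : Int) - 0).toNat = l.length := by omega
  rw [hn, List.range_eq_range']
  have hfold := inner_aux l l.length rfl l.length 0 (by omega) (by omega)
  simp only [List.take_zero, List.drop_zero, List.nil_append] at hfold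
  rw [hfold]
  have hne : l.drop 1 ++ [""] ≠ ([] : List String) := by simp
  rw [pv_setD_neg_one _ _ hne]
  have hlen : (l.drop 1 ++ [""]).length - 1 = l.length - 1 := by simp
  rw [hlen]
  have hset : (l.drop 1 ++ [""]).set (l.length - 1) (PySem.List.pyGetD l 0 "") = l.drop 1 ++ [PySem.List.pyGetD l 0 ""] := by
    rw [List.set_append, if_neg (by simp)]
    have hz : l.length - 1 - (l.drop 1).length = 0 := by simp
    rw [hz]
    rfl
  rw [hset, PySem.List.pyGetD_zero, List.rotate_eq_drop_append_take (by omega)]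
  congr 1
  rw [List.take_one]
  cases l with
  | nil => simp at h
  | cons a t => simp [List.getD]

theorem pvouter (l : List String) (n : Nat) (h : l.length = n) (m j : Nat) (hjm : j + m ≤ n)
    (acc : List String) :
    (List.range' j m).foldl
      (fun (st : List String × List String) (_ : Nat) =>
        let first := pvShift n st.1
        (first, st.2 ++ [PySem.Str.join "" first]))
      (l.rotate j, acc)
    = (l.rotate (j + m), acc ++ (List.range' j m).map (fun k => PySem.Str.join "" (l.rotate (k + 1)))) := by
  induction m generalizing j acc with
  | zero => simp
  | succ m ih =>
    rw [List.range'_succ, List.foldl_cons]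
    have hlen : (l.rotate j).length = n := by simp [h]
    have hpos : 0 < (l.rotate j).length := by omega
    have hsh : pvShift n (l.rotate j) = l.rotate (j + 1) := by
      have := pvshift_rotate (l.rotate j) hpos
      rw [hlen] at this
      rw [this, List.rotate_rotate]
    simp only [hsh]
    rw [ih (j + 1) (by omega) (acc ++ [PySem.Str.join "" (l.rotate (j + 1))])]
    simp only [List.map_cons, List.append_assoc, List.singleton_append]
    have : j + 1 + m = j + (m + 1) := by omega
    rw [this]

theorem pv_main (matrix : List (List String)) :
    get_rotations matrix = get_rotations_alt matrix := by
  unfold get_rotations get_rotations_alt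
  simp only []
  generalize (PySem.List.pyGetD matrix 0 ([] : List String)) = l
  rw [PySem.List.pyRange_one, List.foldl_map, List.map_map]
  have hn : (((l.length : Int)) - 0).toNat = l.length := by omega
  rw [hn, List.range_eq_range']
  have hA := pvouter l l.length rfl l.length 0 (by omega) []
  simp only [List.rotate_zero, Nat.zero_add, List.nil_append] at hA
  rw [hA]
  apply List.map_congr_left
  intro k hk
  have hk' : k < l.length := by
    rw [List.mem_range'_1] at hk; omega
  simp only [Function.comp]
  have e1 : ((0 : Int) + (k : Int) + 1) = (((k + 1 : Nat)) : Int) := by push_cast; ring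
  rw [e1, PySem.List.slice_from_natCast, PySem.List.slice_to_natCast,
      List.rotate_eq_drop_append_take (by omega)]

-- ===== VERDICT (by name: the statement is the Claim_ definition above) =====
theorem get_rotations_spec : Claim_equal_get_rotations := by
  intro matrix _ _
  unfold Spec_get_rotations
  exact pv_main matrix
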